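-- pv_equiv track=rewrite | github.com/brianchiang-tw/HackerRank | Data Structures/Stack/Game of Two Stacks/game_of_two_stacks.py | create_continuous_sum
-- ===== SOURCE A (Python) =====
-- def create_continuous_sum(a, limit):
--
--     Cont_sum = [ a[0] ]
--
--     for element in a[1:]:
--
--         accumulation = element + Cont_sum[-1]
--
--         if accumulation <= limit:
--
--             # extend Cont_Sum as long as possible and keeps not greater than limit
--             Cont_sum += [accumulation]
--         else:
--             # larger than limit, break and retrun
--             break
--
--
--     return list(Cont_sum)
-- ===== SOURCE B (Python) =====
-- def create_continuous_sum(a, limit):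
--     # Pass 1: build the full prefix-sum table.
--     p = []
--     s = 0
--     for x in a:
--         s += x
--         p.append(s)
--     # Pass 2: truncate after the first prefix sum (beyond the first) that exceeds limit.
--     n = 1
--     while n < len(p) and p[n] <= limit:
--         n += 1
--     return p[:n]
-- ===== Notes on version B (the rewrite author's own statement) =====
-- stated objective: alternative
-- what changed: B separates the work into two passes: it first builds the complete prefix-sum table, then truncates it after the first entry (beyond the first) exceeding the limit, instead of A's single loop that appends running sums and breaks; on the empty list (excluded by Pre_) A raises IndexError while B returns [].
import Mathlib
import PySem

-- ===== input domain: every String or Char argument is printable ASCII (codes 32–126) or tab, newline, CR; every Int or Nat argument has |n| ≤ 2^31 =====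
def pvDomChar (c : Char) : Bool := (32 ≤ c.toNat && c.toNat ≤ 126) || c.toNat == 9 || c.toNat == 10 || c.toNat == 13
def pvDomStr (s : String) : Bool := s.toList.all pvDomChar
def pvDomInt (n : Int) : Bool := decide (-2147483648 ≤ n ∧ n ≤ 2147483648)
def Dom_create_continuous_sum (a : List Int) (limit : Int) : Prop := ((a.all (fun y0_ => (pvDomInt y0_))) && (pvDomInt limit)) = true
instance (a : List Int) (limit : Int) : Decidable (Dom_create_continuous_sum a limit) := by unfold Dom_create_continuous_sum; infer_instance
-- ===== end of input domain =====

-- B: two passes — build the full prefix-sum table, then truncate after the first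
-- entry (beyond the first) exceeding the limit — instead of A's single append-and-break loop.
-- On the empty list A raises IndexError while B returns []; Pre_ excludes it.

-- ===== PORT A =====
-- the for-loop over a[1:]: accumulation = element + Cont_sum[-1]; append while ≤ limit, else break
def aLoop (limit : Int) : List Int → List Int → List Int
  | [], cs => cs
  | e :: rest, cs =>
      -- Cont_sum[-1]: cs is never empty along the loop, so getD 0 is exact here
      let accumulation := e + (cs.getLast?).getD 0
      if accumulation ≤ limit then aLoop limit rest (cs ++ [accumulation]) else cs

def create_continuous_sum (a : List Int) (limit : Int) : List Int :=
  match a with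
  | [] => []                      -- Python raises IndexError on a[0]; excluded by Pre_
  | h :: t => aLoop limit t [h]   -- Cont_sum = [a[0]]; loop over a[1:]

-- ===== PORT B =====
-- pass 1: prefix-sum table (s starts at 0, append s += x for each x)
def bPrefix : List Int → Int → List Int
  | [], _ => []
  | x :: t, s => (s + x) :: bPrefix t (s + x)

-- pass 2: while n < len(p) and p[n] <= limit: n += 1
def bWhile (p : List Int) (limit : Int) (n : Nat) : Nat :=
  if n < p.length ∧ (p.getD n 0) ≤ limit then bWhile p limit (n + 1) else n
termination_by p.length - n
decreasing_by omega

def create_continuous_sum_alt (a : List Int) (limit : Int) : List Int :=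
  let p := bPrefix a 0
  p.take (bWhile p limit 1)

-- ===== PRECONDITION & SPEC =====
-- Pre_ excludes the empty list, on which A raises IndexError (a[0]).
def Pre_create_continuous_sum (a : List Int) (limit : Int) : Prop := a ≠ []
instance (a : List Int) (limit : Int) : Decidable (Pre_create_continuous_sum a limit) := by
  unfold Pre_create_continuous_sum; infer_instance

def pvWitness_create_continuous_sum : List Int × Int := ([1, 2, 3], 4)

def Spec_create_continuous_sum (a : List Int) (limit : Int) (out : List Int) : Prop :=
  out = create_continuous_sum_alt a limit
instance (a : List Int) (limit : Int) (out : List Int) : Decidable (Spec_create_continuous_sum a limit out) := by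
  unfold Spec_create_continuous_sum; infer_instance

-- ===== CLAIM (what is proved, stated in full; the proofs are below) =====
def Claim_equal_create_continuous_sum : Prop := ∀ (a : List Int) (limit : Int), Dom_create_continuous_sum a limit → Pre_create_continuous_sum a limit → Spec_create_continuous_sum a limit (create_continuous_sum a limit)


-- ===== LEMMAS AND PROOFS =====

theorem aLoop_eq_takeWhile (limit : Int) (t : List Int) :
    ∀ (cs : List Int) (s : Int), cs.getLast? = some s →
      aLoop limit t cs = cs ++ (bPrefix t s).takeWhile (fun x => x ≤ limit) := by
  induction t with
  | nil => intro cs s _; simp [aLoop, bPrefix]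
  | cons e rest ih =>
      intro cs s hs
      simp only [aLoop, bPrefix, hs, Option.getD_some, List.takeWhile]
      by_cases h : e + s ≤ limit
      · rw [if_pos h, ih (cs ++ [e + s]) (e + s) (by simp)]
        have hc : s + e = e + s := by omega
        simp [List.takeWhile, hc, h]
      · have h' : ¬ s + e ≤ limit := by omega
        rw [if_neg h]
        simp [h']

theorem bWhile_eq (limit : Int) (p : List Int) :
    ∀ n, bWhile p limit n = n + ((p.drop n).takeWhile (fun x => x ≤ limit)).length := by
  intro n
  rw [bWhile]
  by_cases h : n < p.length ∧ p.getD n 0 ≤ limit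
  · rw [if_pos h]
    obtain ⟨hlt, hle⟩ := h
    have h1 : p.drop n = p[n] :: p.drop (n + 1) := List.drop_eq_getElem_cons hlt
    have h2 : p.getD n 0 = p[n] := List.getD_eq_getElem p 0 hlt
    rw [bWhile_eq limit p (n + 1), h1]
    simp only [List.takeWhile]
    rw [h2] at hle
    simp [hle]
    omega
  · rw [if_neg h]
    rcases Nat.lt_or_ge n p.length with hlt | hge
    · have hle : ¬ p.getD n 0 ≤ limit := fun hc => h ⟨hlt, hc⟩
      have h1 : p.drop n = p[n] :: p.drop (n + 1) := List.drop_eq_getElem_cons hlt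
      have h2 : p.getD n 0 = p[n] := List.getD_eq_getElem p 0 hlt
      rw [h1]
      simp only [List.takeWhile]
      rw [h2] at hle
      simp [hle]
    · rw [List.drop_eq_nil_of_le hge]
      simp
termination_by n => p.length - n
decreasing_by omega

theorem take_takeWhile_length (P : Int → Bool) (q : List Int) :
    q.take (q.takeWhile P).length = q.takeWhile P := by
  have h := List.takeWhile_prefix (l := q) (p := P)
  exact (List.prefix_iff_eq_take.mp h).symm

-- ===== VERDICT (by name: the statement is the Claim_ definition above) =====
theorem create_continuous_sum_spec : Claim_equal_create_continuous_sum := by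
  intro a limit _ hpre
  unfold Spec_create_continuous_sum
  match a with
  | [] => exact absurd rfl hpre
  | h :: t =>
      simp only [create_continuous_sum, create_continuous_sum_alt, bPrefix, Int.zero_add]
      rw [aLoop_eq_takeWhile limit t [h] h (by simp)]
      rw [bWhile_eq]
      simp only [List.drop_one, List.tail_cons]
      rw [Nat.add_comm, List.take_succ_cons, take_takeWhile_length]
      simp
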